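-- pv_equiv track=rewrite | github.com/psrenergy/quiver | bindings/python/generator/generator.py | strip_header
-- ===== SOURCE A (Python) =====
-- def strip_header(content: str) -> str:
--     """Strip preprocessor directives and QUIVER_C_API from a header file."""
--     lines: list[str] = []
--
--     for line in content.splitlines():
--         stripped = line.strip()
--
--         # Skip preprocessor directives
--         if stripped.startswith("#"):
--             continue
--
--         # Skip extern "C" braces
--         if stripped in ('extern "C" {', "}"):
--             continue
--
--         # Skip empty lines at the start
--         if not lines and not stripped:
--             continue
--
--         # Strip QUIVER_C_API from function declarations
--         line = line.replace("QUIVER_C_API ", "")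
--
--         lines.append(line)
--
--     # Remove trailing blank lines
--     while lines and not lines[-1].strip():
--         lines.pop()
--
--     return "\n".join(lines)
-- ===== SOURCE B (Python) =====
-- def strip_header(content: str) -> str:
--     """Strip preprocessor directives and QUIVER_C_API from a header file."""
--     lines = content.splitlines()
--
--     # Advance past the leading run of skippable lines (directives, extern "C"
--     # braces, and blank lines before the first real line).
--     i = 0
--     while i < len(lines):
--         s = lines[i].strip()
--         if s and not s.startswith("#") and s not in ('extern "C" {', "}"):
--             break
--         i += 1
--
--     # Build the result back-to-front over the remaining lines; a blank line met
--     # while the suffix is still empty is a trailing blank and is dropped.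
--     tail = ""
--     for line in reversed(lines[i:]):
--         s = line.strip()
--         if s.startswith("#") or s in ('extern "C" {', "}"):
--             continue
--         out = line.replace("QUIVER_C_API ", "")
--         if tail == "" and not out.strip():
--             continue
--         tail = out if tail == "" else out + "\n" + tail
--     return tail
-- ===== Notes on version B (the rewrite author's own statement) =====
-- stated objective: alternative
-- what changed: Instead of A's forward loop that accumulates a list (with an emptiness-coupled leading-blank skip) and then pops trailing blanks, B advances an index past the leading skippable prefix and then builds the output string directly back-to-front in one reversed pass, where trailing blanks are dropped simply because the suffix built so far is still empty; no list is accumulated and no pop loop exists.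
import Mathlib
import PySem

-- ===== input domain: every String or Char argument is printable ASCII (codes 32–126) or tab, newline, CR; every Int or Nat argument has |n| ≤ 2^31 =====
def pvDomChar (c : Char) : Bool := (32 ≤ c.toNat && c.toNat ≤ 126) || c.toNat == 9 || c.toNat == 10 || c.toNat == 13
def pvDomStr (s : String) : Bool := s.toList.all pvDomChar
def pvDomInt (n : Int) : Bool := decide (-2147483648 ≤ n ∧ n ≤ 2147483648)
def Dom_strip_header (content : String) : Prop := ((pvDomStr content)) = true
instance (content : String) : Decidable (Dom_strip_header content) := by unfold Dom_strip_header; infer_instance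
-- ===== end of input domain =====

-- B replaces A's forward list accumulation + trailing pop loop by an index scan past the
-- leading skippable prefix followed by a reversed pass building the string back-to-front.

-- ===== PORT A =====
-- loop body of A: the three skip checks in order, then append line.replace("QUIVER_C_API ", "")
def pvStepA (acc : List String) (line : String) : List String :=
  let stripped := PySem.Str.strip line
  if PySem.Str.startswith stripped "#" then acc
  else if stripped == "extern \"C\" {" || stripped == "}" then acc
  else if acc == [] && stripped == "" then acc
  else acc ++ [PySem.Str.replace line "QUIVER_C_API " ""]

-- A's trailing trim: 'while lines and not lines[-1].strip(): lines.pop()', over the reversed list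
def pvPopTrailingRev : List String → List String
  | [] => []
  | l :: rest => if PySem.Str.strip l == "" then pvPopTrailingRev rest else l :: rest

def pvPopTrailing (ls : List String) : List String := (pvPopTrailingRev ls.reverse).reverse

def strip_header (content : String) : String :=
  let lines := (PySem.Str.splitlines content).foldl pvStepA []
  PySem.Str.join "\n" (pvPopTrailing lines)

-- ===== PORT B =====
-- B's front scan: advance while the line is a directive, an extern "C" brace, or blank
def pvSkipFront : List String → List String
  | [] => []
  | l :: rest =>
    let s := PySem.Str.strip l
    if s != "" && !PySem.Str.startswith s "#" && !(s == "extern \"C\" {" || s == "}") then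
      l :: rest
    else pvSkipFront rest

-- B's reversed-pass body: tail is the output built so far (the suffix of the result)
def pvStepB (tail : String) (line : String) : String :=
  let s := PySem.Str.strip line
  if PySem.Str.startswith s "#" || (s == "extern \"C\" {" || s == "}") then tail
  else
    let out := PySem.Str.replace line "QUIVER_C_API " ""
    if tail == "" && PySem.Str.strip out == "" then tail
    else if tail == "" then out else out ++ "\n" ++ tail

def strip_header_alt (content : String) : String :=
  ((pvSkipFront (PySem.Str.splitlines content)).reverse).foldl pvStepB ""

-- ===== PRECONDITION & SPEC =====
def Spec_strip_header (content : String) (out : String) : Prop := out = strip_header_alt content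
instance (content : String) (out : String) : Decidable (Spec_strip_header content out) := by unfold Spec_strip_header; infer_instance

-- ===== CLAIM (what is proved, stated in full; the proofs are below) =====
def Claim_equal_strip_header : Prop := ∀ (content : String), Dom_strip_header content → Spec_strip_header content (strip_header content)

-- ===== LEMMAS AND PROOFS =====

def pvBlank (line : String) : Bool := PySem.Str.strip line == ""

def pvKeep (line : String) : Bool :=
  !(PySem.Str.startswith (PySem.Str.strip line) "#")
    && !(PySem.Str.strip line == "extern \"C\" {" || PySem.Str.strip line == "}")

def pvRep (line : String) : String := PySem.Str.replace line "QUIVER_C_API " ""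

-- ---- A-side characterisation ----

theorem stepA_skip (acc : List String) (line : String) (hk : pvKeep line = false) :
    pvStepA acc line = acc := by
  simp only [pvStepA]
  split_ifs with h1 h2 h3 <;> try rfl
  exact absurd (by simp only [pvKeep, h1, h2, Bool.not_false, Bool.and_self] :
    pvKeep line = true) (by simp [hk])

theorem stepA_blank (line : String) (hb : pvBlank line = true) :
    pvStepA [] line = [] := by
  simp only [pvStepA]
  split_ifs with h1 h2 h3 <;> try rfl
  simp only [pvBlank] at hb
  simp [hb] at h3

theorem stepA_app (acc : List String) (line : String) (hk : pvKeep line = true)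
    (h : acc = [] → pvBlank line = false) :
    pvStepA acc line = acc ++ [pvRep line] := by
  simp only [pvKeep, Bool.and_eq_true, Bool.not_eq_true', Bool.or_eq_false_iff] at hk
  simp only [pvStepA, pvRep]
  split_ifs with h1 h2 h3 <;> try rfl
  · simp only [hk.1] at h1; exact absurd h1 (by decide)
  · simp only [hk.2.1, hk.2.2] at h2; exact absurd h2 (by decide)
  · simp only [Bool.and_eq_true, beq_iff_eq] at h3
    have := h h3.1
    simp only [pvBlank] at this
    simp [h3.2] at this

theorem foldA_nonempty (xs : List String) : ∀ (acc : List String), acc ≠ [] →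
    xs.foldl pvStepA acc = acc ++ (xs.filter pvKeep).map pvRep := by
  induction xs with
  | nil => intro acc _; simp
  | cons line xs ih =>
    intro acc hacc
    simp only [List.foldl_cons, List.filter_cons]
    by_cases hk : pvKeep line = true
    · rw [stepA_app acc line hk (fun h => absurd h hacc), ih _ (by simp), hk]
      simp
    · rw [stepA_skip acc line (by simpa using hk), ih _ hacc, Bool.not_eq_true] at *
      simp [hk]

theorem foldA_empty (xs : List String) :
    xs.foldl pvStepA [] = ((xs.filter pvKeep).dropWhile pvBlank).map pvRep := by
  induction xs with
  | nil => simp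
  | cons line xs ih =>
    simp only [List.foldl_cons, List.filter_cons]
    by_cases hk : pvKeep line = true
    · by_cases hb : pvBlank line = true
      · rw [stepA_blank line hb, ih, hk]
        simp [hb]
      · rw [stepA_app [] line hk (fun _ => by simpa using hb),
          foldA_nonempty xs _ (by simp), hk]
        simp [hb]
    · rw [stepA_skip [] line (by simpa using hk), ih, Bool.not_eq_true] at *
      simp [hk]

-- ---- the two Bool conditions of port B, in terms of pvBlank / pvKeep ----

theorem condFront_eq (l : String) :
    (PySem.Str.strip l != "" && !PySem.Str.startswith (PySem.Str.strip l) "#"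
      && !(PySem.Str.strip l == "extern \"C\" {" || PySem.Str.strip l == "}"))
      = (!pvBlank l && pvKeep l) := by
  cases hb : (PySem.Str.strip l == "") <;>
    cases h1 : PySem.Chars.startswith (PySem.Chars.strip l.toList) ['#'] <;>
      cases h2 : (PySem.Str.strip l == "extern \"C\" {" || PySem.Str.strip l == "}") <;>
        simp [pvBlank, pvKeep, bne, hb, h1, h2]

theorem condB_eq (l : String) :
    (PySem.Str.startswith (PySem.Str.strip l) "#"
      || (PySem.Str.strip l == "extern \"C\" {" || PySem.Str.strip l == "}"))
      = !pvKeep l := by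
  cases h1 : PySem.Chars.startswith (PySem.Chars.strip l.toList) ['#'] <;>
    cases h2 : (PySem.Str.strip l == "extern \"C\" {" || PySem.Str.strip l == "}") <;>
      simp [pvKeep, h1, h2]

-- ---- B-side front scan ----

theorem skipFront_filter (xs : List String) :
    (pvSkipFront xs).filter pvKeep = (xs.filter pvKeep).dropWhile pvBlank := by
  induction xs with
  | nil => simp [pvSkipFront]
  | cons l xs ih =>
    simp only [pvSkipFront, condFront_eq, List.filter_cons]
    by_cases hk : pvKeep l = true
    · by_cases hb : pvBlank l = true
      · simp [hb, hk, ih]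
      · have hb' := Bool.of_not_eq_true hb
        simp [hb', hk]
    · have hk' := Bool.of_not_eq_true hk
      simp [hk', ih]

-- ---- B-side reversed pass ----

theorem stepB_skip (tail line : String) (hk : pvKeep line = false) :
    pvStepB tail line = tail := by
  simp only [pvStepB, condB_eq, hk]
  simp

theorem stepB_keep (tail line : String) (hk : pvKeep line = true) :
    pvStepB tail line =
      (if tail == "" && pvBlank (pvRep line) then tail
       else if tail == "" then pvRep line else pvRep line ++ "\n" ++ tail) := by
  simp only [pvStepB, condB_eq, hk, pvRep, pvBlank]
  simp

-- ---- pvPopTrailing facts ----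

theorem popRev_nil_iff (zs : List String) :
    pvPopTrailingRev zs = [] ↔ ∀ z ∈ zs, pvBlank z = true := by
  induction zs with
  | nil => simp [pvPopTrailingRev]
  | cons z zs ih =>
    simp only [pvPopTrailingRev]
    by_cases hb : (PySem.Str.strip z == "") = true
    · simp only [hb, if_true, ih, List.mem_cons]
      constructor
      · intro h w hw
        rcases hw with hw | hw
        · rw [hw]; simpa [pvBlank] using hb
        · exact h w hw
      · intro h w hw; exact h w (Or.inr hw)
    · simp only [hb]
      constructor
      · intro h; exact absurd h (by simp)
      · intro h
        exact absurd (h z (List.mem_cons_self)) (by simpa [pvBlank] using hb)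

theorem pop_nil_iff (zs : List String) :
    pvPopTrailing zs = [] ↔ ∀ z ∈ zs, pvBlank z = true := by
  simp only [pvPopTrailing, List.reverse_eq_nil_iff, popRev_nil_iff, List.mem_reverse]

theorem popRev_append (l m : List String) (h : pvPopTrailingRev l ≠ []) :
    pvPopTrailingRev (l ++ m) = pvPopTrailingRev l ++ m := by
  induction l with
  | nil => exact absurd rfl h
  | cons z zs ih =>
    simp only [pvPopTrailingRev, List.cons_append] at *
    by_cases hb : (PySem.Str.strip z == "") = true
    · simp only [hb, if_true] at *; exact ih h
    · simp [hb]

theorem pop_cons_ne (x : String) (zs : List String) (h : pvPopTrailing zs ≠ []) :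
    pvPopTrailing (x :: zs) = x :: pvPopTrailing zs := by
  have hrev : pvPopTrailingRev zs.reverse ≠ [] := by
    intro hc; exact h (by simp [pvPopTrailing, hc])
  simp only [pvPopTrailing, List.reverse_cons, popRev_append _ _ hrev, List.reverse_append]
  rfl

theorem popRev_head_not_blank (zs : List String) (z : String) (rest : List String)
    (h : pvPopTrailingRev zs = z :: rest) : pvBlank z = false := by
  induction zs with
  | nil => simp [pvPopTrailingRev] at h
  | cons w ws ih =>
    simp only [pvPopTrailingRev] at h
    by_cases hb : (PySem.Str.strip w == "") = true
    · simp only [hb, if_true] at h; exact ih h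
    · simp only [hb] at h
      cases h; simpa [pvBlank] using hb

theorem pop_eq_singleton_not_blank (zs : List String) (x : String)
    (h : pvPopTrailing zs = [x]) : pvBlank x = false := by
  have : pvPopTrailingRev zs.reverse = [x] := by
    have := congrArg List.reverse h
    simpa [pvPopTrailing] using this
  exact popRev_head_not_blank _ _ _ this

theorem popRev_allblank_append (ws : List String) (x : String) (hx : pvBlank x = false)
    (hall : ∀ z ∈ ws, pvBlank z = true) : pvPopTrailingRev (ws ++ [x]) = [x] := by
  induction ws with
  | nil =>
    simp only [List.nil_append, pvPopTrailingRev]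
    simp [show (PySem.Str.strip x == "") = false by simpa [pvBlank] using hx]
  | cons w ws ih =>
    simp only [List.cons_append, pvPopTrailingRev]
    have hw : (PySem.Str.strip w == "") = true := by
      simpa [pvBlank] using hall w (List.mem_cons_self)
    simp only [hw, if_true]
    exact ih (fun z hz => hall z (List.mem_cons_of_mem _ hz))

theorem pop_cons_allblank (x : String) (zs : List String) (hx : pvBlank x = false)
    (hall : ∀ z ∈ zs, pvBlank z = true) : pvPopTrailing (x :: zs) = [x] := by
  simp only [pvPopTrailing, List.reverse_cons]
  rw [popRev_allblank_append _ _ hx (fun z hz => hall z (List.mem_reverse.mp hz))]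
  rfl

-- ---- join facts ----

theorem joinStr_nil : PySem.Str.join "\n" ([] : List String) = "" := rfl

theorem joinStr_singleton (x : String) : PySem.Str.join "\n" [x] = x := by
  apply String.toList_inj.mp
  simp [PySem.Str.toList_join, PySem.Chars.join_singleton]

theorem join_cons_ne (x : String) (ys : List String) (hne : ys ≠ []) :
    PySem.Str.join "\n" (x :: ys) = x ++ "\n" ++ PySem.Str.join "\n" ys := by
  apply String.toList_inj.mp
  cases ys with
  | nil => exact absurd rfl hne
  | cons y rest =>
    rw [PySem.Str.toList_join, List.map_cons, List.map_cons, PySem.Chars.join_cons_cons]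
    simp [String.toList_append, PySem.Str.toList_join]

theorem join_pop_ne_empty (zs : List String) (h : pvPopTrailing zs ≠ []) :
    PySem.Str.join "\n" (pvPopTrailing zs) ≠ "" := by
  cases hP : pvPopTrailing zs with
  | nil => exact absurd hP h
  | cons x rest =>
    cases rest with
    | nil =>
      rw [joinStr_singleton]
      intro hx
      have := pop_eq_singleton_not_blank zs x hP
      rw [hx] at this
      simp [pvBlank] at this
      exact this (by decide)
    | cons y rest' =>
      intro hj
      have := congrArg String.toList hj
      rw [PySem.Str.toList_join, List.map_cons, List.map_cons,
        PySem.Chars.join_cons_cons] at this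
      simp at this

-- ---- the reversed fold of B computes A's join-of-trimmed-list ----

theorem foldB_char (ys : List String) :
    ys.foldr (fun l t => pvStepB t l) "" =
      PySem.Str.join "\n" (pvPopTrailing ((ys.filter pvKeep).map pvRep)) := by
  induction ys with
  | nil => rfl
  | cons l ys ih =>
    simp only [List.foldr_cons, List.filter_cons]
    by_cases hk : pvKeep l = true
    · rw [ih, stepB_keep _ _ hk, hk, if_pos rfl, List.map_cons]
      set zs := (ys.filter pvKeep).map pvRep with hzs
      by_cases hP : pvPopTrailing zs = []
      · have ht : PySem.Str.join "\n" (pvPopTrailing zs) = "" := by rw [hP]; rfl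
        have hall : ∀ z ∈ zs, pvBlank z = true := (pop_nil_iff zs).mp hP
        by_cases hb : pvBlank (pvRep l) = true
        · have hnil : pvPopTrailing (pvRep l :: zs) = [] := by
            rw [pop_nil_iff]
            intro z hz
            rcases List.mem_cons.mp hz with h | h
            · rw [h]; exact hb
            · exact hall z h
          rw [hnil, ht, joinStr_nil]
          simp [hb]
        · have hb' := Bool.of_not_eq_true hb
          rw [pop_cons_allblank _ _ hb' hall, joinStr_singleton, ht]
          simp [hb']
      · have htne := join_pop_ne_empty zs hP
        rw [pop_cons_ne _ _ hP, join_cons_ne _ _ hP, beq_false_of_ne htne]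
        simp
    · have hk' := Bool.of_not_eq_true hk
      rw [stepB_skip _ _ hk', ih]
      simp [hk']

-- ===== VERDICT (by name: the statement is the Claim_ definition above) =====
theorem strip_header_spec : Claim_equal_strip_header := by
  intro content _
  show _ = _
  simp only [strip_header, strip_header_alt]
  rw [List.foldl_reverse, foldB_char, skipFront_filter, foldA_empty]
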